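-- pv_equiv track=rewrite | github.com/seopchan/CodingTest | 백준/Silver/1713. 후보 추천하기/후보 추천하기.py | addPicturesWithRecommends
-- ===== SOURCE A (Python) =====
-- def addPicturesWithRecommends(n, m, recommends):
--     사진 = {} # {학생 번호: 추천 횟수}
--     게시순서 = [] # [학생 번호]
--
--     for student in recommends:
--         if student in 사진:
--             # 이미 사진이 올라가 있으면 추천 +1
--             사진[student] += 1
--         else:
--             if len(사진) < n:
--                 # 사진이 비었으면 넣기
--                 사진[student] = 1
--                 게시순서.append(student)
--             else:
--                 # 사진이 다 찼으면, 최소 추천 학생 제거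
--                 minRecommend = min(사진.values())
--                 # 최소 추천 개수 학생 중 가장 오래된 학생 제거
--                 for s in 게시순서:
--                     if 사진[s] == minRecommend:
--                         게시순서.remove(s)
--                         del 사진[s]
--                         break
--                 # 새 사진 추가
--                 사진[student] = 1
--                 게시순서.append(student)
--
--     return(' '.join(map(str, sorted(사진.keys()))))
-- ===== SOURCE B (Python) =====
-- import heapq
--
--
-- def addPicturesWithRecommends(n, m, recommends):
--     count = {}   # student -> current recommendation count
--     time = {}    # student -> timestamp of its current posting
--     heap = []    # lazy min-heap of (count, timestamp, student); stale entries skipped on pop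
--     t = 0        # next timestamp
--     for x in recommends:
--         if x in count:
--             count[x] += 1
--             heapq.heappush(heap, (count[x], time[x], x))
--         else:
--             if len(count) >= n:
--                 # evict: pop until a live entry (matches current count and timestamp)
--                 while True:
--                     c, tt, s = heapq.heappop(heap)
--                     if s in count and count[s] == c and time[s] == tt:
--                         del count[s]
--                         del time[s]
--                         break
--             count[x] = 1
--             time[x] = t
--             heapq.heappush(heap, (1, t, x))
--             t += 1
--     return ' '.join(map(str, sorted(count)))
-- ===== Notes on version B (the rewrite author's own statement) =====
-- stated objective: faster
-- what changed: B replaces A's per-eviction min-scan over the dict values plus a lookup scan over the posting-order list by a lazy-deletion min-heap of (count, timestamp, student) entries keyed lexicographically, so eviction pops the least-recommended oldest student in O(log n) amortised instead of O(n).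
import Mathlib
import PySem

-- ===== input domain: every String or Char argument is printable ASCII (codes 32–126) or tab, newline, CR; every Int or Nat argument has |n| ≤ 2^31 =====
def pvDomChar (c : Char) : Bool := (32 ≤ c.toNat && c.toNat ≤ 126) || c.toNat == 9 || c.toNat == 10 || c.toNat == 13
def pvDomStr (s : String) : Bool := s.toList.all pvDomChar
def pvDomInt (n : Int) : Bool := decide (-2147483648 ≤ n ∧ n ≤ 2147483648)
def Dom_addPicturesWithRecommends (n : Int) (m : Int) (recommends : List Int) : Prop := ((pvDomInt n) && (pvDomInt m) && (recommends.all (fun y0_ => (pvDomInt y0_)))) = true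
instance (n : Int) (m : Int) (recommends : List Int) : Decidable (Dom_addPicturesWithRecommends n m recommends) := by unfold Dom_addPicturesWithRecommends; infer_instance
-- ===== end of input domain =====

-- B replaces A's per-eviction min-scan over the dict plus posting-order lookup scan by a
-- lazy-deletion min-heap of (count, timestamp, student) entries; objective: faster eviction.

-- ===== PORT A =====
-- first student s in `order` with 사진[s] == minRecommend (Python's inner for-loop; the
-- lookup 사진[s] is ported as getD, exact because every s in order is a key of the dict)
def pvFindEvict (photo : PySem.Dict Int Int) (order : List Int) (mval : Int) : Option Int :=
  match order with
  | [] => none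
  | s :: rest => if photo.getD s 0 = mval then some s else pvFindEvict photo rest mval

def pvStepA (n : Int) (st : PySem.Dict Int Int × List Int) (x : Int) : PySem.Dict Int Int × List Int :=
  let photo := st.1
  let order := st.2
  if photo.contains x then
    (photo.modify x 0 (· + 1), order)
  else if (photo.size : Int) < n then
    (photo.insert x 1, order ++ [x])
  else
    -- min(사진.values()); none = Python ValueError on an empty dict (outside Pre_)
    match PySem.List.min? photo.values (fun v => v) with
    | none => (photo.insert x 1, order ++ [x])
    | some mval =>
      match pvFindEvict photo order mval with
      | none => (photo.insert x 1, order ++ [x])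
      | some s =>
        let photo' := photo.erase s
        let order' := (PySem.List.remove? order s).getD order
        (photo'.insert x 1, order' ++ [x])

def addPicturesWithRecommends (n : Int) (m : Int) (recommends : List Int) : String :=
  let st := recommends.foldl (pvStepA n) (PySem.Dict.empty, [])
  PySem.Str.join " " ((PySem.List.sorted st.1.keys (fun k => k) false).map PySem.Int.toStr)

-- ===== PORT B =====
-- Python's `(c, tt, s) <= (c', tt', s')`: lexicographic order on the heap entries
def pvELe (a b : Int × Int × Int) : Bool :=
  a.1 < b.1 || (a.1 == b.1 && (a.2.1 < b.2.1 || (a.2.1 == b.2.1 && a.2.2 ≤ b.2.2)))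

-- heapq ported as push = append, pop = extract the lexicographic minimum: exact because the
-- program never pushes two entries with the same (count, timestamp) key (timestamps are unique
-- per posting, counts strictly increase within one posting), so any min-heap pops the same
-- unique minimum entry that this extraction returns.
def pvHeapMin : List (Int × Int × Int) → Option (Int × Int × Int)
  | [] => none
  | e :: t =>
    match pvHeapMin t with
    | none => some e
    | some m => if pvELe e m then some e else some m

-- the Python validity test `s in count and count[s] == c and time[s] == tt`
-- (time[s] ported as getD: exact, guarded by `s in count` and count/time share their keys)
def pvCheck (cnt tm : PySem.Dict Int Int) (e : Int × Int × Int) : Bool :=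
  cnt.contains e.2.2 && cnt.getD e.2.2 0 == e.1 && tm.getD e.2.2 0 == e.2.1

-- the `while True: heappop …` eviction loop; structural recursion on a fuel that merely
-- bounds the number of pops (each pop shrinks the heap, so heap.length suffices);
-- none = heappop on an empty heap, Python IndexError (outside Pre_)
def pvEvictLoop (cnt tm : PySem.Dict Int Int) :
    Nat → List (Int × Int × Int) → Option (Int × List (Int × Int × Int))
  | 0, _ => none
  | fuel + 1, heap =>
    match pvHeapMin heap with
    | none => none
    | some e =>
      if pvCheck cnt tm e then some (e.2.2, heap.erase e)
      else pvEvictLoop cnt tm fuel (heap.erase e)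

def pvStepH (n : Int) (st : PySem.Dict Int Int × PySem.Dict Int Int × List (Int × Int × Int) × Int)
    (x : Int) : PySem.Dict Int Int × PySem.Dict Int Int × List (Int × Int × Int) × Int :=
  let cnt := st.1
  let tm := st.2.1
  let heap := st.2.2.1
  let t := st.2.2.2
  if cnt.contains x then
    let cnt' := cnt.modify x 0 (· + 1)
    (cnt', tm, heap ++ [(cnt'.getD x 0, tm.getD x 0, x)], t)
  else
    let s' :=
      if n ≤ (cnt.size : Int) then
        match pvEvictLoop cnt tm heap.length heap with
        | none => (cnt, tm, heap)          -- Python raised IndexError here (outside Pre_)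
        | some (s, h') => (cnt.erase s, tm.erase s, h')
      else (cnt, tm, heap)
    (s'.1.insert x 1, s'.2.1.insert x t, s'.2.2 ++ [(1, t, x)], t + 1)

def addPicturesWithRecommends_alt (n : Int) (m : Int) (recommends : List Int) : String :=
  let st := recommends.foldl (pvStepH n) (PySem.Dict.empty, PySem.Dict.empty, [], 0)
  PySem.Str.join " " ((PySem.List.sorted st.1.keys (fun k => k) false).map PySem.Int.toStr)

-- ===== PRECONDITION & SPEC =====
-- Pre_ excludes exactly the inputs where A raises: with n < 1 and a nonempty recommends list
-- the first new student triggers min() over an empty dict, a ValueError (B's heappop on the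
-- empty heap raises IndexError there too).
def Pre_addPicturesWithRecommends (n : Int) (m : Int) (recommends : List Int) : Prop :=
  1 ≤ n ∨ recommends = []
instance (n : Int) (m : Int) (recommends : List Int) : Decidable (Pre_addPicturesWithRecommends n m recommends) := by unfold Pre_addPicturesWithRecommends; infer_instance

def pvWitness_addPicturesWithRecommends : Int × Int × List Int := (2, 6, [1, 2, 3, 2, 1, 4])

def Spec_addPicturesWithRecommends (n : Int) (m : Int) (recommends : List Int) (out : String) : Prop := out = addPicturesWithRecommends_alt n m recommends
instance (n : Int) (m : Int) (recommends : List Int) (out : String) : Decidable (Spec_addPicturesWithRecommends n m recommends out) := by unfold Spec_addPicturesWithRecommends; infer_instance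

-- ===== CLAIM (what is proved, stated in full; the proofs are below) =====
def Claim_equal_addPicturesWithRecommends : Prop := ∀ (n : Int) (m : Int) (recommends : List Int), Dom_addPicturesWithRecommends n m recommends → Pre_addPicturesWithRecommends n m recommends → Spec_addPicturesWithRecommends n m recommends (addPicturesWithRecommends n m recommends)

-- ===== LEMMAS AND PROOFS =====

-- ghost board: (student, count, timestamp) triples in posting order
def pvProjC (G : List (Int × Int × Int)) : List (Int × Int) := G.map (fun g => (g.1, g.2.1))
def pvProjT (G : List (Int × Int × Int)) : List (Int × Int) := G.map (fun g => (g.1, g.2.2))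
def pvEntry (g : Int × Int × Int) : Int × Int × Int := (g.2.1, g.2.2, g.1)

-- the simulation invariant tying A's (photo, order) and B's (cnt, tm, heap, t) to the ghost board
def pvInv (stA : PySem.Dict Int Int × List Int)
    (stB : PySem.Dict Int Int × PySem.Dict Int Int × List (Int × Int × Int) × Int)
    (G : List (Int × Int × Int)) : Prop :=
  stA.1 = PySem.Dict.mk (pvProjC G) ∧
  stA.2 = G.map (fun g => g.1) ∧
  stB.1 = PySem.Dict.mk (pvProjC G) ∧
  stB.2.1 = PySem.Dict.mk (pvProjT G) ∧
  (G.map (fun g => g.1)).Nodup ∧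
  (G.map (fun g => g.2.2)).Pairwise (· < ·) ∧
  (∀ g ∈ G, g.2.2 < stB.2.2.2) ∧
  (∀ g ∈ G, pvEntry g ∈ stB.2.2.1) ∧
  (∀ e ∈ stB.2.2.1, e.2.1 < stB.2.2.2)

theorem pvELe_refl (a : Int × Int × Int) : pvELe a a = true := by
  simp [pvELe]

theorem pvELe_total (a b : Int × Int × Int) (h : pvELe a b = false) : pvELe b a = true := by
  obtain ⟨a1, a2, a3⟩ := a; obtain ⟨b1, b2, b3⟩ := b
  simp [pvELe] at h ⊢; omega

theorem pvELe_trans (a b c : Int × Int × Int) (h1 : pvELe a b = true) (h2 : pvELe b c = true) :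
    pvELe a c = true := by
  obtain ⟨a1, a2, a3⟩ := a; obtain ⟨b1, b2, b3⟩ := b; obtain ⟨c1, c2, c3⟩ := c
  simp [pvELe] at h1 h2 ⊢; omega

theorem pvELe_antisymm (a b : Int × Int × Int) (h1 : pvELe a b = true) (h2 : pvELe b a = true) :
    a = b := by
  obtain ⟨a1, a2, a3⟩ := a; obtain ⟨b1, b2, b3⟩ := b
  simp [pvELe] at h1 h2
  have h3 : a1 = b1 ∧ a2 = b2 ∧ a3 = b3 := by omega
  simp [h3.1, h3.2.1, h3.2.2]

theorem pvHeapMin_mem (h : List (Int × Int × Int)) (e : Int × Int × Int)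
    (he : pvHeapMin h = some e) : e ∈ h := by
  induction h generalizing e with
  | nil => simp [pvHeapMin] at he
  | cons a t ih =>
    simp only [pvHeapMin] at he
    cases hm : pvHeapMin t with
    | none => rw [hm] at he; simp at he; simp [he]
    | some m =>
      rw [hm] at he
      by_cases hle : pvELe a m = true
      · simp [hle] at he; simp [he]
      · simp [hle] at he
        exact List.mem_cons_of_mem a (ih e (he ▸ hm))

theorem pvHeapMin_eq_none_iff (h : List (Int × Int × Int)) : pvHeapMin h = none ↔ h = [] := by
  cases h with
  | nil => simp [pvHeapMin]
  | cons a t =>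
    simp only [pvHeapMin]
    cases pvHeapMin t with
    | none => simp
    | some m => by_cases hle : pvELe a m = true <;> simp [hle]

theorem pvHeapMin_le (h : List (Int × Int × Int)) (e : Int × Int × Int)
    (he : pvHeapMin h = some e) : ∀ w ∈ h, pvELe e w = true := by
  induction h generalizing e with
  | nil => simp [pvHeapMin] at he
  | cons a t ih =>
    simp only [pvHeapMin] at he
    cases hm : pvHeapMin t with
    | none =>
      rw [hm] at he; simp at he; subst he
      have ht : t = [] := (pvHeapMin_eq_none_iff t).mp hm
      subst ht
      intro w hw
      rcases List.mem_cons.mp hw with rfl | hw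
      · exact pvELe_refl _
      · simp at hw
    | some m =>
      rw [hm] at he
      by_cases hle : pvELe a m = true
      · simp [hle] at he; subst he
        intro w hw
        rcases List.mem_cons.mp hw with rfl | hw
        · exact pvELe_refl _
        · exact pvELe_trans _ _ _ hle (ih m hm w hw)
      · simp [hle] at he; subst he
        intro w hw
        rcases List.mem_cons.mp hw with rfl | hw
        · exact pvELe_total _ _ (Bool.eq_false_iff.mpr hle)
        · exact ih _ hm w hw

-- the eviction loop pops exactly the least live entry and keeps every other live entry
theorem pvEvictLoop_spec (cnt tm : PySem.Dict Int Int) (v : Int × Int × Int) :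
    ∀ (fuel : Nat) (heap : List (Int × Int × Int)), heap.length ≤ fuel → v ∈ heap →
    pvCheck cnt tm v = true →
    (∀ e ∈ heap, pvCheck cnt tm e = true → pvELe v e = true) →
    ∃ h', pvEvictLoop cnt tm fuel heap = some (v.2.2, h') ∧ h'.Sublist heap ∧
      (∀ e ∈ heap, pvCheck cnt tm e = true → e ≠ v → e ∈ h') := by
  intro fuel
  induction fuel with
  | zero =>
    intro heap hlen hv _ _
    have := List.length_pos_of_mem hv
    omega
  | succ fuel ih =>
    intro heap hlen hv hcv hmin
    obtain ⟨e0, hm0⟩ : ∃ e0, pvHeapMin heap = some e0 := by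
      cases he : pvHeapMin heap with
      | none =>
        rw [pvHeapMin_eq_none_iff] at he
        subst he; simp at hv
      | some e0 => exact ⟨e0, rfl⟩
    have he0mem : e0 ∈ heap := pvHeapMin_mem heap e0 hm0
    by_cases hck : pvCheck cnt tm e0 = true
    · have hvel : pvELe v e0 = true := hmin e0 he0mem hck
      have helv : pvELe e0 v = true := pvHeapMin_le heap e0 hm0 v hv
      have heq : e0 = v := pvELe_antisymm _ _ helv hvel
      subst heq
      refine ⟨heap.erase e0, ?_, List.erase_sublist, ?_⟩
      · simp [pvEvictLoop, hm0, hck]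
      · intro e he hce hne
        exact (List.mem_erase_of_ne hne).mpr he
    · have hne0 : e0 ≠ v := fun hh => hck (hh ▸ hcv)
      have hv' : v ∈ heap.erase e0 := (List.mem_erase_of_ne (Ne.symm hne0)).mpr hv
      have hlen' : (heap.erase e0).length ≤ fuel := by
        have := List.length_erase_of_mem he0mem
        have := List.length_pos_of_mem hv
        omega
      obtain ⟨h', hloop, hsub, hsurv⟩ := ih (heap.erase e0) hlen' hv' hcv
        (fun e he hce => hmin e (List.mem_of_mem_erase he) hce)
      refine ⟨h', ?_, hsub.trans List.erase_sublist, ?_⟩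
      · simp [pvEvictLoop, hm0, hck, hloop]
      · intro e he hce hnev
        have hnee0 : e ≠ e0 := fun hh => hck (hh ▸ hce)
        exact hsurv e ((List.mem_erase_of_ne hnee0).mpr he) hce hnev

theorem pvKeysC (G : List (Int × Int × Int)) :
    (PySem.Dict.mk (pvProjC G)).keys = G.map (fun g => g.1) := by
  simp [pvProjC]

theorem pvKeysT (G : List (Int × Int × Int)) :
    (PySem.Dict.mk (pvProjT G)).keys = G.map (fun g => g.1) := by
  simp [pvProjT]

theorem pvLookupC (G : List (Int × Int × Int)) (hnd : (G.map (fun g => g.1)).Nodup)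
    {g : Int × Int × Int} (hg : g ∈ G) :
    (PySem.Dict.mk (pvProjC G)).getD g.1 0 = g.2.1 := by
  have hmem : (g.1, g.2.1) ∈ (PySem.Dict.mk (pvProjC G)).items := List.mem_map.mpr ⟨g, hg, rfl⟩
  have hk : (PySem.Dict.mk (pvProjC G)).keys.Nodup := by rw [pvKeysC]; exact hnd
  exact PySem.Dict.getD_of_mem_items _ hmem hk 0

theorem pvLookupT (G : List (Int × Int × Int)) (hnd : (G.map (fun g => g.1)).Nodup)
    {g : Int × Int × Int} (hg : g ∈ G) :
    (PySem.Dict.mk (pvProjT G)).getD g.1 0 = g.2.2 := by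
  have hmem : (g.1, g.2.2) ∈ (PySem.Dict.mk (pvProjT G)).items := List.mem_map.mpr ⟨g, hg, rfl⟩
  have hk : (PySem.Dict.mk (pvProjT G)).keys.Nodup := by rw [pvKeysT]; exact hnd
  exact PySem.Dict.getD_of_mem_items _ hmem hk 0

theorem pvContainsC (G : List (Int × Int × Int)) (x : Int) :
    (PySem.Dict.mk (pvProjC G)).contains x = true ↔ x ∈ G.map (fun g => g.1) := by
  rw [PySem.Dict.contains_iff_mem_keys, pvKeysC]

theorem pvContainsT (G : List (Int × Int × Int)) (x : Int) :
    (PySem.Dict.mk (pvProjT G)).contains x = true ↔ x ∈ G.map (fun g => g.1) := by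
  rw [PySem.Dict.contains_iff_mem_keys, pvKeysT]

-- the Python validity test holds exactly on the live entries of the ghost board
theorem pvCheck_iff (G : List (Int × Int × Int)) (hnd : (G.map (fun g => g.1)).Nodup)
    (e : Int × Int × Int) :
    pvCheck (PySem.Dict.mk (pvProjC G)) (PySem.Dict.mk (pvProjT G)) e = true ↔
      ∃ g ∈ G, e = pvEntry g := by
  constructor
  · intro h
    simp only [pvCheck, Bool.and_eq_true, beq_iff_eq] at h
    obtain ⟨⟨hcont, hc⟩, ht⟩ := h
    obtain ⟨g, hg, hg1⟩ := List.mem_map.mp ((pvContainsC G e.2.2).mp hcont)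
    refine ⟨g, hg, ?_⟩
    have h1 : g.2.1 = e.1 := by rw [← hc, ← hg1, pvLookupC G hnd hg]
    have h2 : g.2.2 = e.2.1 := by rw [← ht, ← hg1, pvLookupT G hnd hg]
    simp [pvEntry, h1, h2, hg1]
  · rintro ⟨g, hg, rfl⟩
    simp only [pvCheck, pvEntry, Bool.and_eq_true, beq_iff_eq]
    exact ⟨⟨(pvContainsC G g.1).mpr (List.mem_map.mpr ⟨g, hg, rfl⟩),
      pvLookupC G hnd hg⟩, pvLookupT G hnd hg⟩

theorem pvGetD_mk_cons (s : Int) (c : Int) (t : List (Int × Int)) (x : Int) :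
    (PySem.Dict.mk ((s, c) :: t)).getD x 0 = if s = x then c else (PySem.Dict.mk t).getD x 0 := by
  rw [PySem.Dict.getD_eq_get?_getD, PySem.Dict.get?_mk_cons]
  by_cases h : s = x
  · simp [h]
  · simp [h, PySem.Dict.getD_eq_get?_getD]

theorem pvFindEvict_shrink (a : Int) (c : Int) (t : List (Int × Int)) (order : List Int)
    (mval : Int) (h : a ∉ order) :
    pvFindEvict (PySem.Dict.mk ((a, c) :: t)) order mval
      = pvFindEvict (PySem.Dict.mk t) order mval := by
  induction order with
  | nil => rfl
  | cons s rest ih =>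
    have hsa : a ≠ s := fun hh => h (hh ▸ List.mem_cons_self)
    have htl : a ∉ rest := fun hh => h (List.mem_cons_of_mem _ hh)
    simp only [pvFindEvict, pvGetD_mk_cons, if_neg hsa, ih htl]

-- A's inner eviction scan is find? over the ghost board
theorem pvFindEvict_eq (G : List (Int × Int × Int)) (hnd : (G.map (fun g => g.1)).Nodup)
    (mval : Int) :
    pvFindEvict (PySem.Dict.mk (pvProjC G)) (G.map (fun g => g.1)) mval
      = (G.find? (fun g => g.2.1 == mval)).map (fun g => g.1) := by
  induction G with
  | nil => rfl
  | cons g rest ih =>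
    simp only [List.map_cons, List.nodup_cons] at hnd ⊢
    have hhead : (PySem.Dict.mk (pvProjC (g :: rest))).getD g.1 0 = g.2.1 := by
      show (PySem.Dict.mk ((g.1, g.2.1) :: pvProjC rest)).getD g.1 0 = g.2.1
      rw [pvGetD_mk_cons]; simp
    by_cases hc : g.2.1 = mval
    · have hf : List.find? (fun g => g.2.1 == mval) (g :: rest) = some g :=
        List.find?_cons_of_pos (by simp [hc])
      simp only [pvFindEvict, hhead, if_pos hc, hf, Option.map_some]
    · have hshr : pvFindEvict (PySem.Dict.mk (pvProjC (g :: rest))) (rest.map (fun g => g.1)) mval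
          = pvFindEvict (PySem.Dict.mk (pvProjC rest)) (rest.map (fun g => g.1)) mval := by
        show pvFindEvict (PySem.Dict.mk ((g.1, g.2.1) :: pvProjC rest)) _ mval = _
        exact pvFindEvict_shrink _ _ _ _ _ hnd.1
      have hf : List.find? (fun g => g.2.1 == mval) (g :: rest)
          = List.find? (fun g => g.2.1 == mval) rest :=
        List.find?_cons_of_neg (by simp [hc])
      simp only [pvFindEvict, hhead, if_neg hc, hshr, ih hnd.2, hf]

-- the first minimal-count entry of the board is the lexicographic minimum of the live entries
theorem pvMinValid (G : List (Int × Int × Int)) (hpw : (G.map (fun g => g.2.2)).Pairwise (· < ·))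
    (mval : Int) (gs : Int × Int × Int) (hfind : G.find? (fun g => g.2.1 == mval) = some gs)
    (hmin : ∀ g ∈ G, mval ≤ g.2.1) :
    ∀ g ∈ G, pvELe (pvEntry gs) (pvEntry g) = true := by
  induction G with
  | nil => simp at hfind
  | cons a rest ih =>
    simp only [List.map_cons, List.pairwise_cons] at hpw
    by_cases hc : a.2.1 = mval
    · rw [List.find?_cons_of_pos (by simp [hc])] at hfind
      obtain rfl : a = gs := Option.some.inj hfind
      intro g hg
      rcases List.mem_cons.mp hg with rfl | hg
      · exact pvELe_refl _
      · have h1 : mval ≤ g.2.1 := hmin g (List.mem_cons_of_mem _ hg)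
        have h2 : a.2.2 < g.2.2 := hpw.1 g.2.2 (List.mem_map.mpr ⟨g, hg, rfl⟩)
        obtain ⟨g1, g2, g3⟩ := g
        dsimp only at h1 h2
        simp only [pvELe, pvEntry, Bool.or_eq_true, Bool.and_eq_true, beq_iff_eq,
          decide_eq_true_eq] at h2 ⊢
        omega
    · rw [List.find?_cons_of_neg (by simp [hc])] at hfind
      have hgs : gs.2.1 = mval := by
        have := List.find?_some hfind
        simpa using this
      intro g hg
      rcases List.mem_cons.mp hg with rfl | hg
      · have h1 : mval ≤ g.2.1 := hmin g List.mem_cons_self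
        obtain ⟨g1, g2, g3⟩ := g
        dsimp only at h1 hc
        simp only [pvELe, pvEntry, Bool.or_eq_true, Bool.and_eq_true, beq_iff_eq,
          decide_eq_true_eq] at hc ⊢
        omega
      · exact ih hpw.2 hfind (fun g hg => hmin g (List.mem_cons_of_mem _ hg)) g hg

theorem pvNodupSnoc (l : List Int) (x : Int) (h : l.Nodup) (hx : x ∉ l) : (l ++ [x]).Nodup := by
  simp only [List.nodup_append, List.nodup_singleton, true_and, h]
  intro a ha b hb
  obtain rfl := List.mem_singleton.mp hb
  exact fun hax => hx (hax ▸ ha)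

theorem pvStep_rel (n : Int) (hn : 1 ≤ n) (stA : PySem.Dict Int Int × List Int)
    (stB : PySem.Dict Int Int × PySem.Dict Int Int × List (Int × Int × Int) × Int)
    (G : List (Int × Int × Int)) (x : Int) (h : pvInv stA stB G) :
    ∃ G', pvInv (pvStepA n stA x) (pvStepH n stB x) G' := by
  obtain ⟨photo, order⟩ := stA
  obtain ⟨cnt, tm, heap, t⟩ := stB
  obtain ⟨hA1, hA2, hB1, hB2, hnd, hpw, hlt, hcomp, hht⟩ := h
  dsimp only at hA1 hA2 hB1 hB2 hlt hcomp hht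
  subst hA1 hA2 hB1 hB2
  by_cases hx : (PySem.Dict.mk (pvProjC G)).contains x = true
  · -- x is already on the board: bump its count
    refine ⟨G.map (fun g => if g.1 == x then (g.1, g.2.1 + 1, g.2.2) else g), ?_⟩
    have hmod : (PySem.Dict.mk (pvProjC G)).modify x 0 (· + 1)
        = PySem.Dict.mk (pvProjC (G.map (fun g => if g.1 == x then (g.1, g.2.1 + 1, g.2.2) else g))) := by
      apply PySem.Dict.ext
      show ((PySem.Dict.mk (pvProjC G)).insert x ((PySem.Dict.mk (pvProjC G)).getD x 0 + 1)).items = _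
      rw [PySem.Dict.items_insert_of_contains _ _ hx]
      show (pvProjC G).map (fun p => if p.1 == x then (x, (PySem.Dict.mk (pvProjC G)).getD x 0 + 1) else p)
          = _
      simp only [pvProjC, List.map_map]
      apply List.map_congr_left
      intro g hg
      by_cases hgx : g.1 = x
      · have hv : (PySem.Dict.mk (pvProjC G)).getD x 0 = g.2.1 := by
          rw [← hgx]; exact pvLookupC G hnd hg
        simp only [pvProjC] at hv
        simp [Function.comp, hgx, hv]
      · simp [Function.comp, hgx]
    have hkeys : (G.map (fun g => if g.1 == x then (g.1, g.2.1 + 1, g.2.2) else g)).map (fun g => g.1)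
        = G.map (fun g => g.1) := by
      simp only [List.map_map]
      apply List.map_congr_left
      intro g _
      by_cases hgx : g.1 = x <;> simp [Function.comp, hgx]
    have htimes : (G.map (fun g => if g.1 == x then (g.1, g.2.1 + 1, g.2.2) else g)).map (fun g => g.2.2)
        = G.map (fun g => g.2.2) := by
      simp only [List.map_map]
      apply List.map_congr_left
      intro g _
      by_cases hgx : g.1 = x <;> simp [Function.comp, hgx]
    have hprojT : pvProjT (G.map (fun g => if g.1 == x then (g.1, g.2.1 + 1, g.2.2) else g))
        = pvProjT G := by
      simp only [pvProjT, List.map_map]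
      apply List.map_congr_left
      intro g _
      by_cases hgx : g.1 = x <;> simp [Function.comp, hgx]
    simp only [pvStepA, pvStepH, if_pos hx]
    refine ⟨hmod, by rw [hkeys], hmod, by rw [hprojT], by rw [hkeys]; exact hnd,
      by rw [htimes]; exact hpw, ?_, ?_, ?_⟩
    · intro g' hg'
      obtain ⟨g, hg, rfl⟩ := List.mem_map.mp hg'
      by_cases hgx : g.1 = x
      · simp only [hgx, beq_self_eq_true, if_true]
        exact hlt g hg
      · rw [if_neg (by simp [hgx])]
        exact hlt g hg
    · intro g' hg'
      obtain ⟨g, hg, rfl⟩ := List.mem_map.mp hg'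
      by_cases hgx : g.1 = x
      · have hvC : (PySem.Dict.mk (pvProjC G)).getD x 0 = g.2.1 := by
          rw [← hgx]; exact pvLookupC G hnd hg
        have hvT : (PySem.Dict.mk (pvProjT G)).getD x 0 = g.2.2 := by
          rw [← hgx]; exact pvLookupT G hnd hg
        apply List.mem_append_right
        rw [PySem.Dict.getD_modify_self, hvC, hvT]
        simp [pvEntry, hgx]
      · rw [if_neg (by simp [hgx])]
        exact List.mem_append_left _ (hcomp g hg)
    · intro e he
      rcases List.mem_append.mp he with he | he
      · exact hht e he
      · obtain ⟨gx, hgx, hgx1⟩ := List.mem_map.mp ((pvContainsC G x).mp hx)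
        have hvT : (PySem.Dict.mk (pvProjT G)).getD x 0 = gx.2.2 := by
          rw [← hgx1]; exact pvLookupT G hnd hgx
        simp only [List.mem_singleton] at he
        subst he
        simpa [hvT] using hlt gx hgx
  · -- x is not on the board
    have hxf : (PySem.Dict.mk (pvProjC G)).contains x = false := Bool.eq_false_iff.mpr hx
    have hxm : x ∉ G.map (fun g => g.1) := fun hh => hx ((pvContainsC G x).mpr hh)
    have hsize : ((PySem.Dict.mk (pvProjC G)).size : Int) = (G.length : Int) := by
      simp [PySem.Dict.size, pvProjC]
    -- generic append step: inserting a fresh student x at time t onto any board H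
    have hins : ∀ H : List (Int × Int × Int), x ∉ H.map (fun g => g.1) →
        (PySem.Dict.mk (pvProjC H)).insert x 1 = PySem.Dict.mk (pvProjC (H ++ [(x, 1, t)]))
        ∧ (PySem.Dict.mk (pvProjT H)).insert x t = PySem.Dict.mk (pvProjT (H ++ [(x, 1, t)])) := by
      intro H hxH
      constructor
      · apply PySem.Dict.ext
        rw [PySem.Dict.items_insert_of_not_contains _ _
          (Bool.eq_false_iff.mpr (fun hh => hxH ((pvContainsC H x).mp hh)))]
        simp [pvProjC]
      · apply PySem.Dict.ext
        rw [PySem.Dict.items_insert_of_not_contains _ _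
          (Bool.eq_false_iff.mpr (fun hh => hxH ((pvContainsT H x).mp hh)))]
        simp [pvProjT]
    by_cases hroom : ((PySem.Dict.mk (pvProjC G)).size : Int) < n
    · -- room on the board: plain append
      refine ⟨G ++ [(x, 1, t)], ?_⟩
      have hB : pvStepH n (PySem.Dict.mk (pvProjC G), PySem.Dict.mk (pvProjT G), heap, t) x
          = ((PySem.Dict.mk (pvProjC G)).insert x 1, (PySem.Dict.mk (pvProjT G)).insert x t,
             heap ++ [(1, t, x)], t + 1) := by
        have hcond : ¬ (n ≤ ((PySem.Dict.mk (pvProjC G)).size : Int)) := by omega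
        simp only [pvStepH, hxf, Bool.false_eq_true, if_false, if_neg hcond]
      have hA : pvStepA n (PySem.Dict.mk (pvProjC G), G.map (fun g => g.1)) x
          = ((PySem.Dict.mk (pvProjC G)).insert x 1, G.map (fun g => g.1) ++ [x]) := by
        simp only [pvStepA, hxf, Bool.false_eq_true, if_false, if_pos hroom]
      rw [hA, hB]
      unfold pvInv
      dsimp only
      obtain ⟨hiC, hiT⟩ := hins G hxm
      refine ⟨hiC, by simp, hiC, hiT, ?_, ?_, ?_, ?_, ?_⟩
      · simp only [List.map_append]
        exact pvNodupSnoc _ _ hnd hxm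
      · simp only [List.map_append]
        refine List.pairwise_append.mpr ⟨hpw, by simp, ?_⟩
        intro a ha b hb
        simp only [List.map_cons, List.map_nil, List.mem_singleton] at hb
        obtain ⟨g, hg, rfl⟩ := List.mem_map.mp ha
        subst hb
        exact hlt g hg
      · intro g hg
        rcases List.mem_append.mp hg with hg | hg
        · have := hlt g hg; omega
        · simp only [List.mem_singleton] at hg; subst hg; simp
      · intro g hg
        rcases List.mem_append.mp hg with hg | hg
        · exact List.mem_append_left _ (hcomp g hg)
        · simp only [List.mem_singleton] at hg; subst hg
          exact List.mem_append_right _ (by simp [pvEntry])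
      · intro e he
        rcases List.mem_append.mp he with he | he
        · have := hht e he; omega
        · simp only [List.mem_singleton] at he; subst he; simp
    · -- the board is full: evict the least-recommended oldest student
      have hfull : n ≤ (G.length : Int) := by rw [hsize] at hroom; omega
      have hGne : G ≠ [] := by
        intro hh; subst hh; simp at hfull; omega
      have hvals : (PySem.Dict.mk (pvProjC G)).values = G.map (fun g => g.2.1) := by
        simp [pvProjC]
      obtain ⟨mval, hmin?⟩ : ∃ v, PySem.List.min? (G.map (fun g => g.2.1)) (fun v => v) = some v := by
        cases hmm : PySem.List.min? (G.map (fun g => g.2.1)) (fun v => v) with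
        | none =>
          rw [PySem.List.min?_eq_none_iff] at hmm
          exact absurd (List.map_eq_nil_iff.mp hmm) hGne
        | some v => exact ⟨v, rfl⟩
      have hmvmem : mval ∈ G.map (fun g => g.2.1) := PySem.List.min?_mem hmin?
      have hmvmin : ∀ g ∈ G, mval ≤ g.2.1 := fun g hg =>
        PySem.List.min?_isMin hmin? _ (List.mem_map.mpr ⟨g, hg, rfl⟩)
      obtain ⟨gs, hfind⟩ : ∃ gs, G.find? (fun g => g.2.1 == mval) = some gs := by
        obtain ⟨g0, hg0, hg0v⟩ := List.mem_map.mp hmvmem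
        exact Option.isSome_iff_exists.mp (List.find?_isSome.mpr ⟨g0, hg0, by simp [hg0v]⟩)
      have hgsG : gs ∈ G := List.mem_of_find?_eq_some hfind
      have hfd : pvFindEvict (PySem.Dict.mk (pvProjC G)) (G.map (fun g => g.1)) mval
          = some gs.1 := by
        rw [pvFindEvict_eq G hnd mval, hfind]; rfl
      have hsm : gs.1 ∈ G.map (fun g => g.1) := List.mem_map.mpr ⟨gs, hgsG, rfl⟩
      have hrem : PySem.List.remove? (G.map (fun g => g.1)) gs.1
          = some ((G.map (fun g => g.1)).erase gs.1) :=
        PySem.List.remove?_eq_some_erase _ _ hsm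
      -- run the eviction loop on B's side
      have hvcheck : pvCheck (PySem.Dict.mk (pvProjC G)) (PySem.Dict.mk (pvProjT G)) (pvEntry gs)
          = true := (pvCheck_iff G hnd (pvEntry gs)).mpr ⟨gs, hgsG, rfl⟩
      have hminv : ∀ e ∈ heap,
          pvCheck (PySem.Dict.mk (pvProjC G)) (PySem.Dict.mk (pvProjT G)) e = true →
          pvELe (pvEntry gs) e = true := by
        intro e _ hce
        obtain ⟨g, hgG, rfl⟩ := (pvCheck_iff G hnd e).mp hce
        exact pvMinValid G hpw mval gs hfind hmvmin g hgG
      obtain ⟨h', hloop, hsub, hsurv⟩ := pvEvictLoop_spec (PySem.Dict.mk (pvProjC G))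
        (PySem.Dict.mk (pvProjT G)) (pvEntry gs) heap.length heap le_rfl
        (hcomp gs hgsG) hvcheck hminv
      -- the surviving ghost board
      refine ⟨G.filter (fun g => !(g.1 == gs.1)) ++ [(x, 1, t)], ?_⟩
      have hA : pvStepA n (PySem.Dict.mk (pvProjC G), G.map (fun g => g.1)) x
          = (((PySem.Dict.mk (pvProjC G)).erase gs.1).insert x 1,
             (G.map (fun g => g.1)).erase gs.1 ++ [x]) := by
        simp only [pvStepA, hxf, Bool.false_eq_true, if_false, if_neg hroom, hvals, hmin?, hfd,
          hrem, Option.getD_some]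
      have hB : pvStepH n (PySem.Dict.mk (pvProjC G), PySem.Dict.mk (pvProjT G), heap, t) x
          = (((PySem.Dict.mk (pvProjC G)).erase gs.1).insert x 1,
             ((PySem.Dict.mk (pvProjT G)).erase gs.1).insert x t, h' ++ [(1, t, x)], t + 1) := by
        have hc2 : n ≤ ((PySem.Dict.mk (pvProjC G)).size : Int) := by rw [hsize]; omega
        simp only [pvStepH, hxf, Bool.false_eq_true, if_false, if_pos hc2, hloop]
        simp [pvEntry]
      rw [hA, hB]
      unfold pvInv
      dsimp only
      have hEc : (PySem.Dict.mk (pvProjC G)).erase gs.1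
          = PySem.Dict.mk (pvProjC (G.filter (fun g => !(g.1 == gs.1)))) := by
        apply PySem.Dict.ext
        show (pvProjC G).filter (fun p => !(p.1 == gs.1)) = _
        simp only [pvProjC, List.filter_map]
        rfl
      have hEt : (PySem.Dict.mk (pvProjT G)).erase gs.1
          = PySem.Dict.mk (pvProjT (G.filter (fun g => !(g.1 == gs.1)))) := by
        apply PySem.Dict.ext
        show (pvProjT G).filter (fun p => !(p.1 == gs.1)) = _
        simp only [pvProjT, List.filter_map]
        rfl
      have horder : (G.map (fun g => g.1)).erase gs.1
          = (G.filter (fun g => !(g.1 == gs.1))).map (fun g => g.1) := by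
        rw [List.Nodup.erase_eq_filter hnd, List.filter_map]
        rfl
      have hsubG : (G.filter (fun g => !(g.1 == gs.1))).Sublist G := List.filter_sublist
      have hxm' : x ∉ (G.filter (fun g => !(g.1 == gs.1))).map (fun g => g.1) := by
        intro hh
        exact hxm ((hsubG.map (fun g => g.1)).mem hh)
      obtain ⟨hiC, hiT⟩ := hins (G.filter (fun g => !(g.1 == gs.1))) hxm'
      rw [hEc, hEt]
      refine ⟨hiC, by rw [horder]; simp, hiC, hiT, ?_, ?_, ?_, ?_, ?_⟩
      · simp only [List.map_append]
        exact pvNodupSnoc _ _ (hnd.sublist (hsubG.map _)) hxm'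
      · simp only [List.map_append]
        refine List.pairwise_append.mpr ⟨hpw.sublist (hsubG.map _), by simp, ?_⟩
        intro a ha b hb
        simp only [List.map_cons, List.map_nil, List.mem_singleton] at hb
        obtain ⟨g, hg, rfl⟩ := List.mem_map.mp ha
        subst hb
        exact hlt g (hsubG.mem hg)
      · intro g hg
        rcases List.mem_append.mp hg with hg | hg
        · have := hlt g (hsubG.mem hg); omega
        · simp only [List.mem_singleton] at hg; subst hg; simp
      · intro g hg
        rcases List.mem_append.mp hg with hg | hg
        · have hgG : g ∈ G := hsubG.mem hg
          have hck : pvCheck (PySem.Dict.mk (pvProjC G)) (PySem.Dict.mk (pvProjT G)) (pvEntry g)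
              = true := (pvCheck_iff G hnd (pvEntry g)).mpr ⟨g, hgG, rfl⟩
          have hne : pvEntry g ≠ pvEntry gs := by
            intro hh
            have h1 : g.1 = gs.1 := congrArg (fun e => e.2.2) hh
            have := List.of_mem_filter hg
            simp [h1] at this
          exact List.mem_append_left _ (hsurv (pvEntry g) (hcomp g hgG) hck hne)
        · simp only [List.mem_singleton] at hg; subst hg
          exact List.mem_append_right _ (by simp [pvEntry])
      · intro e he
        rcases List.mem_append.mp he with he | he
        · have := hht e (hsub.subset he); omega
        · simp only [List.mem_singleton] at he; subst he; simp

theorem pvFold_rel (n : Int) (hn : 1 ≤ n) (l : List Int) (stA : PySem.Dict Int Int × List Int)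
    (stB : PySem.Dict Int Int × PySem.Dict Int Int × List (Int × Int × Int) × Int)
    (G : List (Int × Int × Int)) (h : pvInv stA stB G) :
    ∃ G', pvInv (l.foldl (pvStepA n) stA) (l.foldl (pvStepH n) stB) G' := by
  induction l generalizing stA stB G with
  | nil => exact ⟨G, h⟩
  | cons a t ih =>
    obtain ⟨G', h'⟩ := pvStep_rel n hn stA stB G a h
    exact ih _ _ G' h'

-- ===== VERDICT (by name: the statement is the Claim_ definition above) =====
theorem addPicturesWithRecommends_spec : Claim_equal_addPicturesWithRecommends := by
  intro n m recommends _ hpre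
  unfold Spec_addPicturesWithRecommends
  rcases hpre with hn | hnil
  · suffices h : ∃ G, pvInv (recommends.foldl (pvStepA n) (PySem.Dict.empty, []))
        (recommends.foldl (pvStepH n) (PySem.Dict.empty, PySem.Dict.empty, [], 0)) G by
      obtain ⟨G, h1, _, h3, _⟩ := h
      simp only [addPicturesWithRecommends, addPicturesWithRecommends_alt]
      rw [h1, h3]
    have base : pvInv (PySem.Dict.empty, []) (PySem.Dict.empty, PySem.Dict.empty, [], 0) [] := by
      refine ⟨rfl, rfl, rfl, rfl, by simp, by simp, by simp, by simp, by simp⟩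
    exact pvFold_rel n hn recommends _ _ [] base
  · subst hnil; rfl
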